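-- pv_equiv track=rewrite | github.com/GenericName192/python-stuff | Reddit_challenges/Challenge_one/Nonogram_row.py | nonogram_solver
-- ===== SOURCE A (Python) =====
-- def nonogram_solver(nonogram):
--     return_list = []
--     number_tracker = 0
--     for x in nonogram:
--         if x:
--             number_tracker += 1
--         else:
--             if number_tracker:
--                 return_list.append(number_tracker)
--                 number_tracker = 0
--     if number_tracker:
--         return_list.append(number_tracker)
--     return return_list
-- ===== SOURCE B (Python) =====
-- def nonogram_solver(nonogram):
--     runs = []
--     i, n = 0, len(nonogram)
--     while i < n:
--         if nonogram[i]: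
--             j = i
--             while j < n and nonogram[j]:
--                 j += 1
--             runs.append(j - i)
--             i = j
--         else:
--             i += 1
--     return runs
-- ===== Notes on version B (the rewrite author's own statement) =====
-- stated objective: alternative
-- what changed: Replaces the single-pass counter-accumulator fold (increment on truthy, flush on falsy and at the end) with a span/two-pointer scan that, at each truthy position, advances an inner pointer to the end of the maximal run and emits its length directly, so no pending-run state or end-of-loop flush exists.
import Mathlib
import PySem

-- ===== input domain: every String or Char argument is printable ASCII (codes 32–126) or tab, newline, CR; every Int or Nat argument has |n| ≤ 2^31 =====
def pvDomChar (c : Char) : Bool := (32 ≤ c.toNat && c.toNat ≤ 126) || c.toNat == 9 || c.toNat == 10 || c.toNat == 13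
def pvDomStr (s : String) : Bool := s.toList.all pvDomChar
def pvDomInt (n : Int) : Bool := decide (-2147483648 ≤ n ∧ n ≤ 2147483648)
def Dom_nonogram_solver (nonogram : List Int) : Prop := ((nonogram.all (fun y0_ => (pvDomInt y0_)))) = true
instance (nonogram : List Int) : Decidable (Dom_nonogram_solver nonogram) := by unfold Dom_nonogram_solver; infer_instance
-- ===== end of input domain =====

-- B replaces A's pending-counter fold with a span scan that emits each maximal truthy run's length directly (alternative decomposition, same cost).

-- ===== PORT A =====
-- A's loop body: increment the tracker on truthy x, flush it on falsy x
def pvStep (st : List Int × Int) (x : Int) : List Int × Int :=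
  if x ≠ 0 then (st.1, st.2 + 1)
  else if st.2 ≠ 0 then (st.1 ++ [st.2], 0) else st

-- A's final 'if number_tracker: return_list.append(number_tracker)'
def pvFinish (s : List Int × Int) : List Int := if s.2 ≠ 0 then s.1 ++ [s.2] else s.1

def nonogram_solver (nonogram : List Int) : List Int :=
  pvFinish (nonogram.foldl pvStep ([], 0))

-- ===== PORT B =====
-- B's inner while-loop scanning a run = takeWhile/dropWhile span on the remaining list
def nonogram_solver_alt : List Int → List Int
  | [] => []
  | x :: xs =>
    if x ≠ 0 then
      (((x :: xs).takeWhile (fun y => y ≠ 0)).length : Int)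
        :: nonogram_solver_alt ((x :: xs).dropWhile (fun y => y ≠ 0))
    else nonogram_solver_alt xs
  termination_by xs => xs.length
  decreasing_by
    · simp only [List.dropWhile]
      simp_all
      exact List.length_dropWhile_le _ _
    · simp

-- ===== PRECONDITION & SPEC =====
def Spec_nonogram_solver (nonogram : List Int) (out : List Int) : Prop := out = nonogram_solver_alt nonogram
instance (nonogram : List Int) (out : List Int) : Decidable (Spec_nonogram_solver nonogram out) := by unfold Spec_nonogram_solver; infer_instance

-- ===== CLAIM (what is proved, stated in full; the proofs are below) =====
def Claim_equal_nonogram_solver : Prop := ∀ (nonogram : List Int), Dom_nonogram_solver nonogram → Spec_nonogram_solver nonogram (nonogram_solver nonogram)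

-- ===== LEMMAS AND PROOFS =====

-- what B computes when a run of length t is already pending
def pvCont (t : Int) (xs : List Int) : List Int :=
  if t = 0 then nonogram_solver_alt xs
  else (t + ((xs.takeWhile (fun y => y ≠ 0)).length : Int))
        :: nonogram_solver_alt (xs.dropWhile (fun y => y ≠ 0))

lemma pv_loop (xs : List Int) : ∀ (acc : List Int) (t : Int), 0 ≤ t →
    pvFinish (xs.foldl pvStep (acc, t)) = acc ++ pvCont t xs := by
  induction xs with
  | nil =>
    intro acc t ht
    by_cases h : t = 0 <;> simp [pvFinish, pvCont, h, nonogram_solver_alt]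
  | cons x xs ih =>
    intro acc t ht
    by_cases hx : x = 0
    · subst hx
      have hs : pvStep (acc, t) 0 = if t ≠ 0 then (acc ++ [t], 0) else (acc, t) := by
        simp [pvStep]
      by_cases h : t = 0
      · subst h
        rw [List.foldl_cons, hs, if_neg (by simp), ih acc 0 le_rfl]
        simp [pvCont, nonogram_solver_alt]
      · rw [List.foldl_cons, hs, if_pos h, ih (acc ++ [t]) 0 le_rfl]
        simp [pvCont, h, nonogram_solver_alt, List.takeWhile, List.dropWhile]
    · have hs : pvStep (acc, t) x = (acc, t + 1) := by simp [pvStep, hx]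
      rw [List.foldl_cons, hs, ih acc (t + 1) (by omega)]
      by_cases h : t = 0
      · subst h
        simp [pvCont, nonogram_solver_alt, hx, List.takeWhile, List.dropWhile]
        ring
      · simp only [pvCont, if_neg h, if_neg (by omega : ¬ t + 1 = 0)]
        simp [List.takeWhile, List.dropWhile, hx]
        ring

-- ===== VERDICT (by name: the statement is the Claim_ definition above) =====
theorem nonogram_solver_spec : Claim_equal_nonogram_solver := by
  intro xs _
  show nonogram_solver xs = nonogram_solver_alt xs
  have h := pv_loop xs [] 0 le_rfl
  simpa [nonogram_solver, pvCont] using h
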